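-- pv_equiv track=rewrite | github.com/ericskim/redax | redax/utils/bv.py | index_interval
-- ===== SOURCE A (Python) =====
-- from typing import Sequence, Iterable, List
--
-- def increment_index(index: int, increment: int, nbits=None, graycode=False):
--     if graycode:
--         assert nbits is not None
--         index = graytobin(index)
--         index = (index + increment) % 2**nbits
--         return bintogray(index)
--     else:
--         return index + increment
--
-- def index_interval(lb: int, ub: int, nbits=None, graycode=False) -> List[int]:
--     """Construct an integer interval that includes both ends lb and ub."""
--     if graycode:
--         assert nbits is not None
--     else:
--         assert lb <= ub
--
--     window = []
--     i = lb
--     while True: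
--         window.append(i)
--         if i == ub:
--             break
--         i = increment_index(i, 1, nbits, graycode)
--     return window
--
-- def bintogray(x: int) -> int:
--     """
--     Convert a binary encoded positive integer into gray code.
--     """
--     assert x >= 0
--     return x ^ (x >> 1)
--
-- def graytobin(x: int) -> int:
--     """
--     Convert a gray code encoded positive integer into the standard binary encoding.
--     """
--     assert x >= 0
--     mask = x >> 1
--     while(mask != 0):
--         x = x ^ mask
--         mask = mask >> 1
--     return x
-- ===== SOURCE B (Python) =====
-- def _bintogray(x: int) -> int:
--     assert x >= 0
--     return x ^ (x >> 1)
--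
--
-- def _graytobin(x: int) -> int:
--     assert x >= 0
--     return x ^ _graytobin(x >> 1) if x else 0
--
--
-- def index_interval(lb: int, ub: int, nbits=None, graycode=False):
--     """Construct an integer interval that includes both ends lb and ub."""
--     if graycode:
--         assert nbits is not None
--         start = _graytobin(lb)
--         end = _graytobin(ub)
--         size = 2 ** nbits
--         count = (end - start) % size
--         return [_bintogray((start + k) % size) for k in range(count + 1)]
--     else:
--         assert lb <= ub
--         return list(range(lb, ub + 1))
-- ===== Notes on version B (the rewrite author's own statement) =====
-- stated objective: simpler
-- what changed: B computes the interval length arithmetically ((graytobin(ub)-graytobin(lb)) mod 2**nbits, or ub-lb) and builds the result by mapping bintogray over one contiguous range (with a recursive graytobin), instead of A's one-step-at-a-time walk that increments and re-encodes until it happens to hit ub.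
-- outside the precondition, e.g. on index_interval(-3, -3, 2, True): A returns [-3], B raises AssertionError; on index_interval(4, 4, 2, True): A returns [4], B returns [2]; on index_interval(4, 0, 2, True): A returns [4, 0], B returns [2, 0]
import Mathlib
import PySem

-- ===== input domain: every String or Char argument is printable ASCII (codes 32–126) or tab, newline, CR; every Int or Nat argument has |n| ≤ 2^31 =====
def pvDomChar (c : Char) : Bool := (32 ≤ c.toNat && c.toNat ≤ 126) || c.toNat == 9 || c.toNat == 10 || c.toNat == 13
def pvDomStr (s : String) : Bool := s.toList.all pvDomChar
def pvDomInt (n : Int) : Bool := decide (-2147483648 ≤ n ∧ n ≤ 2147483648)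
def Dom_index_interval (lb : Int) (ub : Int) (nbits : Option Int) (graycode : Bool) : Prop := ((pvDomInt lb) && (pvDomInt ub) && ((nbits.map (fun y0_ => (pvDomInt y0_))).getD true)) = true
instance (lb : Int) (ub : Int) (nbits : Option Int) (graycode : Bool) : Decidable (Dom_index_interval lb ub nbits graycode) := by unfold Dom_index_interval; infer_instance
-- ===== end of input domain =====

-- B replaces A's one-step-at-a-time walk to ub with a closed-form count (difference of the
-- decoded endpoints mod 2^nbits) and a single map over a contiguous range (objective: simpler).

-- ===== PORT A =====
-- graytobin's mask loop: x, mask := x >> 1; while mask != 0: x ^= mask; mask >>= 1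
def pvGrayLoopA (x mask : Nat) : Nat :=
  if mask = 0 then x else pvGrayLoopA (x ^^^ mask) (mask / 2)
  termination_by mask
  decreasing_by exact Nat.div_lt_self (Nat.pos_of_ne_zero (by assumption)) (by omega)

-- assert x >= 0 raises for x < 0 (excluded by Pre_); for x ≥ 0, x >> 1 = x.toNat / 2 exactly
def pvGraytobinA (x : Int) : Int :=
  if x < 0 then 0 else (pvGrayLoopA x.toNat (x.toNat / 2) : Int)

def pvBintograyA (x : Int) : Int :=
  if x < 0 then 0 else ((x.toNat ^^^ x.toNat / 2 : Nat) : Int)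

-- increment_index; the `none` and negative-nbits branches raise in Python (excluded by Pre_)
def pvIncrementIndexA (index increment : Int) (nbits : Option Int) (graycode : Bool) : Int :=
  if graycode then
    match nbits with
    | none => 0
    | some n =>
      if n < 0 then 0
      else pvBintograyA (PySem.Int.mod (pvGraytobinA index + increment) ((2 ^ n.toNat : Nat) : Int))
  else index + increment

-- the `while True` loop of index_interval, with fuel (ample under Pre_; see index_interval)
def pvLoopA (ub : Int) (nbits : Option Int) (graycode : Bool) : Nat → Int → List Int → List Int
  | 0, _, acc => acc.reverse
  | fuel + 1, i, acc =>
    if i = ub then (i :: acc).reverse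
    else pvLoopA ub nbits graycode fuel (pvIncrementIndexA i 1 nbits graycode) (i :: acc)

def index_interval (lb : Int) (ub : Int) (nbits : Option Int) (graycode : Bool) : List Int :=
  if graycode then
    match nbits with
    | none => []   -- assert nbits is not None fails: Python raises (outside Pre_)
    | some n =>
      if n < 0 then []  -- 2**nbits is a float: Python raises on the first step (outside Pre_)
      else pvLoopA ub nbits graycode (2 ^ n.toNat + 1) lb []
  else
    if lb ≤ ub then pvLoopA ub nbits graycode ((ub - lb).toNat + 1) lb []
    else []  -- assert lb <= ub fails (outside Pre_)

-- ===== PORT B =====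
-- B's recursive _graytobin: x ^ _graytobin(x >> 1) if x else 0
def pvGraytobinRecB (x : Nat) : Nat :=
  if x = 0 then 0 else x ^^^ pvGraytobinRecB (x / 2)
  termination_by x
  decreasing_by exact Nat.div_lt_self (Nat.pos_of_ne_zero (by assumption)) (by omega)

def pvGraytobinB (x : Int) : Int :=
  if x < 0 then 0 else (pvGraytobinRecB x.toNat : Int)

def pvBintograyB (x : Int) : Int :=
  if x < 0 then 0 else ((x.toNat ^^^ x.toNat / 2 : Nat) : Int)

def index_interval_alt (lb : Int) (ub : Int) (nbits : Option Int) (graycode : Bool) : List Int :=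
  if graycode then
    match nbits with
    | none => []  -- assert fails (outside Pre_)
    | some n =>
      if n < 0 then []  -- 2**nbits is a float: raises (outside Pre_)
      else
        let start := pvGraytobinB lb
        let stop := pvGraytobinB ub
        let size : Int := ((2 ^ n.toNat : Nat) : Int)
        let count := PySem.Int.mod (stop - start) size
        (PySem.List.pyRange 0 (count + 1) 1).map
          (fun k => pvBintograyB (PySem.Int.mod (start + k) size))
  else
    if lb ≤ ub then PySem.List.pyRange lb (ub + 1) 1
    else []  -- assert fails (outside Pre_)

-- ===== PRECONDITION & SPEC =====
-- Pre_ excludes inputs on which A raises (graycode with nbits=None, nbits<0 reached, or a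
-- negative value fed to graytobin; lb>ub without graycode; unreachable ub = endless loop), and
-- additionally the accidental corners where A still returns a value only because the lb==ub
-- shortcut (or an out-of-range lb that happens to re-enter the 2^nbits cycle) bypasses the gray
-- encoding entirely — there B's endpoint arithmetic either raises or yields the encoded interval.
-- In gray mode Pre_ therefore requires nbits ≥ 0 and both endpoints to be nbits-wide codes;
-- the disjunct `32 ≤ n` only makes the bound cheap to decide: on Dom (|lb|,|ub| ≤ 2^31 < 2^32)
-- it is equivalent to lb < 2^n ∧ ub < 2^n.
def Pre_index_interval (lb : Int) (ub : Int) (nbits : Option Int) (graycode : Bool) : Prop :=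
  if graycode then
    0 ≤ nbits.getD (-1) ∧ 0 ≤ lb ∧ 0 ≤ ub ∧
      (32 ≤ nbits.getD (-1) ∨
        (lb < ((2 ^ (nbits.getD (-1)).toNat : Nat) : Int) ∧
         ub < ((2 ^ (nbits.getD (-1)).toNat : Nat) : Int)))
  else lb ≤ ub

instance (lb : Int) (ub : Int) (nbits : Option Int) (graycode : Bool) : Decidable (Pre_index_interval lb ub nbits graycode) := by unfold Pre_index_interval; infer_instance

def pvWitness_index_interval : Int × Int × Option Int × Bool := (0, 2, some 2, true)

def Spec_index_interval (lb : Int) (ub : Int) (nbits : Option Int) (graycode : Bool) (out : List Int) : Prop := out = index_interval_alt lb ub nbits graycode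
instance (lb : Int) (ub : Int) (nbits : Option Int) (graycode : Bool) (out : List Int) : Decidable (Spec_index_interval lb ub nbits graycode out) := by unfold Spec_index_interval; infer_instance

-- ===== CLAIM (what is proved, stated in full; the proofs are below) =====
def Claim_equal_index_interval : Prop := ∀ (lb : Int) (ub : Int) (nbits : Option Int) (graycode : Bool), Dom_index_interval lb ub nbits graycode → Pre_index_interval lb ub nbits graycode → Spec_index_interval lb ub nbits graycode (index_interval lb ub nbits graycode)

-- ===== LEMMAS AND PROOFS =====

theorem pvXorDivTwo (a b : Nat) : (a ^^^ b) / 2 = a / 2 ^^^ b / 2 := by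
  simpa [Nat.shiftRight_succ, Nat.shiftRight_zero] using
    Nat.shiftRight_xor_distrib (a := a) (b := b) (i := 1)

-- the mask loop equals the recursive prefix-xor
theorem pvGrayLoopA_eq (mask x : Nat) :
    pvGrayLoopA x mask = x ^^^ pvGraytobinRecB mask := by
  induction mask using Nat.strong_induction_on generalizing x with
  | _ mask ih =>
    rw [pvGrayLoopA.eq_def]
    by_cases h : mask = 0
    · simp [h, pvGraytobinRecB]
    · rw [if_neg h, ih (mask / 2) (Nat.div_lt_self (by omega) (by omega))]
      conv_rhs => rw [pvGraytobinRecB.eq_def]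
      rw [if_neg h, Nat.xor_assoc]

theorem pvGraytobinA_eq (x : Nat) : pvGraytobinA (x : Int) = (pvGraytobinRecB x : Int) := by
  rw [pvGraytobinA, if_neg (by omega), Int.toNat_natCast, pvGrayLoopA_eq]
  by_cases h : x = 0
  · simp [h, pvGraytobinRecB]
  · conv_rhs => rw [pvGraytobinRecB.eq_def]
    rw [if_neg h]

theorem pvGraytobinRecB_div2 (x : Nat) : pvGraytobinRecB x / 2 = pvGraytobinRecB (x / 2) := by
  induction x using Nat.strong_induction_on with
  | _ x ih =>
    by_cases h : x = 0
    · simp [h, pvGraytobinRecB]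
    · conv_lhs => rw [pvGraytobinRecB.eq_def]
      rw [if_neg h, pvXorDivTwo, ih (x / 2) (Nat.div_lt_self (by omega) (by omega))]
      by_cases h2 : x / 2 = 0
      · simp [h2, pvGraytobinRecB]
      · conv_rhs => rw [pvGraytobinRecB.eq_def]
        rw [if_neg h2]

-- graytobin ∘ bintogray = id
theorem pvGB (x : Nat) : pvGraytobinRecB (x ^^^ x / 2) = x := by
  induction x using Nat.strong_induction_on with
  | _ x ih =>
    by_cases h : x = 0
    · simp [h, pvGraytobinRecB]
    · rw [pvGraytobinRecB.eq_def,
        if_neg (by simp only [Nat.xor_eq_zero_iff]; omega)]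
      rw [pvXorDivTwo]
      rw [ih (x / 2) (Nat.div_lt_self (by omega) (by omega))]
      rw [Nat.xor_assoc, Nat.xor_self, Nat.xor_zero]

-- bintogray ∘ graytobin = id
theorem pvBG (x : Nat) : pvGraytobinRecB x ^^^ pvGraytobinRecB x / 2 = x := by
  by_cases h : x = 0
  · simp [h, pvGraytobinRecB]
  · rw [pvGraytobinRecB_div2]
    conv_lhs => rw [pvGraytobinRecB.eq_def, if_neg h]
    rw [Nat.xor_assoc, Nat.xor_self, Nat.xor_zero]

theorem pvBinj {a b : Nat} (h : a ^^^ a / 2 = b ^^^ b / 2) : a = b := by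
  have := pvGB a; rw [h, pvGB b] at this; exact this.symm

theorem pvGraytobinRecB_lt {x M : Nat} (h : x < 2 ^ M) : pvGraytobinRecB x < 2 ^ M := by
  induction x using Nat.strong_induction_on with
  | _ x ih =>
    by_cases h0 : x = 0
    · simpa [h0, pvGraytobinRecB] using Nat.two_pow_pos M
    · rw [pvGraytobinRecB.eq_def, if_neg h0]
      exact Nat.xor_lt_two_pow h
        (ih (x / 2) (Nat.div_lt_self (by omega) (by omega))
          (lt_of_le_of_lt (Nat.div_le_self _ _) h))

-- one gray step of A, on an encoded in-range value
theorem pvStepA (n : Int) (hn : 0 ≤ n) (m : Nat) :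
    pvIncrementIndexA ((m ^^^ m / 2 : Nat) : Int) 1 (some n) true
      = (((m + 1) % 2 ^ n.toNat ^^^ ((m + 1) % 2 ^ n.toNat) / 2 : Nat) : Int) := by
  have hmod : PySem.Int.mod (pvGraytobinA ((m ^^^ m / 2 : Nat) : Int) + 1) ((2 ^ n.toNat : Nat) : Int)
      = (((m + 1) % 2 ^ n.toNat : Nat) : Int) := by
    rw [pvGraytobinA_eq, pvGB]
    rw [show ((m : Int) + 1) = ((m + 1 : Nat) : Int) by push_cast; ring]
    exact PySem.Int.mod_natCast _ _
  have hbin : ∀ y : Nat, pvBintograyA ((y : Nat) : Int) = ((y ^^^ y / 2 : Nat) : Int) := by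
    intro y; rw [pvBintograyA, if_neg (by omega), Int.toNat_natCast]
  rw [pvIncrementIndexA]
  rw [if_pos rfl, if_neg (by omega : ¬ n < 0), hmod, hbin]

-- A's gray loop, fully characterised: from the code of m, with d more steps to the code of t
theorem pvLoopA_gray (n : Int) (hn : 0 ≤ n) (t : Nat) :
    ∀ (d : Nat), d < 2 ^ n.toNat →
    ∀ (fuel : Nat), d ≤ fuel →
    ∀ (m : Nat), m < 2 ^ n.toNat → t = (m + d) % 2 ^ n.toNat →
    ∀ (acc : List Int),
      pvLoopA ((t ^^^ t / 2 : Nat) : Int) (some n) true (fuel + 1) ((m ^^^ m / 2 : Nat) : Int) acc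
        = acc.reverse ++ (List.range (d + 1)).map
            (fun k => (((m + k) % 2 ^ n.toNat ^^^ ((m + k) % 2 ^ n.toNat) / 2 : Nat) : Int)) := by
  intro d
  induction d with
  | zero =>
    intro _ fuel _ m hm hmt acc
    have htm : t = m := by rw [hmt, Nat.add_zero, Nat.mod_eq_of_lt hm]
    subst htm
    rw [pvLoopA, if_pos rfl]
    simp [Nat.mod_eq_of_lt hm]
  | succ d ih =>
    intro hd fuel hfuel m hm hmt acc
    obtain ⟨f, rfl⟩ : ∃ f, fuel = f + 1 := ⟨fuel - 1, by omega⟩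
    have hne : ((m ^^^ m / 2 : Nat) : Int) ≠ ((t ^^^ t / 2 : Nat) : Int) := by
      intro h
      have hmt' : m = t := pvBinj (by exact_mod_cast h)
      rw [← hmt'] at hmt
      have heq : (m + (d + 1)) % 2 ^ n.toNat = m % 2 ^ n.toNat := by
        rw [← hmt, Nat.mod_eq_of_lt hm]
      have hmodeq : Nat.ModEq (2 ^ n.toNat) (m + (d + 1)) (m + 0) := by
        simpa [Nat.ModEq] using heq
      have h3 := Nat.ModEq.add_left_cancel' m hmodeq
      rw [Nat.ModEq, Nat.mod_eq_of_lt hd, Nat.zero_mod] at h3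
      omega
    rw [pvLoopA, if_neg hne, pvStepA n hn m]
    rw [ih (by omega) f (by omega) ((m + 1) % 2 ^ n.toNat)
        (Nat.mod_lt _ (Nat.two_pow_pos _))
        (by rw [hmt, Nat.mod_add_mod, Nat.add_assoc, Nat.add_comm 1 d]) ((((m ^^^ m / 2 : Nat)) : Int) :: acc)]
    rw [List.range_succ_eq_map (n := d + 1)]
    simp only [List.map_cons, List.map_map, List.reverse_cons, List.append_assoc,
      List.cons_append, List.nil_append, Nat.add_zero, Nat.mod_eq_of_lt hm]
    congr 2
    apply List.map_congr_left
    intro k _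
    simp only [Function.comp_apply, Nat.mod_add_mod]
    rw [show m + 1 + k = m + k.succ by omega]

-- A's non-gray loop equals range(lb, ub+1)
theorem pvLoopA_lin (nbits : Option Int) :
    ∀ (d : Nat) (fuel : Nat), d ≤ fuel → ∀ (lb ub : Int), ub = lb + d →
    ∀ (acc : List Int),
      pvLoopA ub nbits false (fuel + 1) lb acc = acc.reverse ++ PySem.List.pyRange lb (ub + 1) 1 := by
  intro d
  induction d with
  | zero =>
    intro fuel _ lb ub hub acc
    have : lb = ub := by omega
    subst this
    rw [pvLoopA, if_pos rfl, PySem.List.pyRange_one_singleton]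
    simp
  | succ d ih =>
    intro fuel hfuel lb ub hub acc
    obtain ⟨f, rfl⟩ : ∃ f, fuel = f + 1 := ⟨fuel - 1, by omega⟩
    rw [pvLoopA, if_neg (by omega)]
    have hstep : pvIncrementIndexA lb 1 nbits false = lb + 1 := by
      rw [pvIncrementIndexA.eq_def]; simp
    rw [hstep, ih f (by omega) (lb + 1) ub (by omega) (lb :: acc)]
    rw [PySem.List.pyRange_one_cons (by omega : lb < ub + 1)]
    simp

-- Int floor-mod of a difference of Nats, modulus 2^M
theorem pvCountEq (s t M : Nat) (hs : s < 2 ^ M) :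
    PySem.Int.mod ((t : Int) - s) ((2 ^ M : Nat) : Int)
      = (((t + (2 ^ M - s)) % 2 ^ M : Nat) : Int) := by
  rw [PySem.Int.mod_eq_emod_of_pos (by exact_mod_cast Nat.two_pow_pos M)]
  have h1 : ((t : Int) - s) = ((t + (2 ^ M - s) : Nat) : Int) - ((2 ^ M : Nat) : Int) := by
    push_cast [Nat.cast_sub (le_of_lt hs)]; ring
  rw [h1, Int.sub_emod_right]
  exact (Int.natCast_mod _ _).symm

theorem index_interval_gray (lb ub n : Int) (hn : 0 ≤ n)
    (hlb : 0 ≤ lb) (hub : 0 ≤ ub)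
    (hlb2 : lb < ((2 ^ n.toNat : Nat) : Int)) (hub2 : ub < ((2 ^ n.toNat : Nat) : Int)) :
    index_interval lb ub (some n) true = index_interval_alt lb ub (some n) true := by
  set M := n.toNat with hM
  have hNpos : 0 < 2 ^ M := Nat.two_pow_pos M
  set s := pvGraytobinRecB lb.toNat with hsdef
  set t := pvGraytobinRecB ub.toNat with htdef
  have hlbN : lb.toNat < 2 ^ M := by omega
  have hubN : ub.toNat < 2 ^ M := by omega
  have hs : s < 2 ^ M := pvGraytobinRecB_lt hlbN
  have ht : t < 2 ^ M := pvGraytobinRecB_lt hubN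
  set c := (t + (2 ^ M - s)) % 2 ^ M with hcdef
  have hc : c < 2 ^ M := Nat.mod_lt _ hNpos
  have hct : t = (s + c) % 2 ^ M := by
    rw [hcdef, Nat.add_mod_mod]
    rw [show s + (t + (2 ^ M - s)) = t + 2 ^ M by omega]
    rw [Nat.add_mod_right, Nat.mod_eq_of_lt ht]
  have hlbB : ((s ^^^ s / 2 : Nat) : Int) = lb := by
    rw [hsdef, pvBG]; omega
  have hubB : ((t ^^^ t / 2 : Nat) : Int) = ub := by
    rw [htdef, pvBG]; omega
  have hA : index_interval lb ub (some n) true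
      = (List.range (c + 1)).map
          (fun k => (((s + k) % 2 ^ M ^^^ ((s + k) % 2 ^ M) / 2 : Nat) : Int)) := by
    have h1 : index_interval lb ub (some n) true
        = pvLoopA ub (some n) true (2 ^ M + 1) lb [] := by
      rw [index_interval, if_pos rfl, if_neg (by omega : ¬ n < 0)]
    rw [h1, ← hlbB, ← hubB,
      pvLoopA_gray n hn t c hc (2 ^ M) (by omega) s hs hct []]
    simp only [List.reverse_nil, List.nil_append]
    apply List.map_congr_left
    intro a _
    rw [← hM]
  have hB : index_interval_alt lb ub (some n) true
      = (List.range (c + 1)).map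
          (fun k => (((s + k) % 2 ^ M ^^^ ((s + k) % 2 ^ M) / 2 : Nat) : Int)) := by
    rw [index_interval_alt, if_pos rfl, if_neg (by omega : ¬ n < 0)]
    have hgb : pvGraytobinB lb = (s : Int) := by
      rw [pvGraytobinB, if_neg (by omega), hsdef]
    have hgb2 : pvGraytobinB ub = (t : Int) := by
      rw [pvGraytobinB, if_neg (by omega), htdef]
    simp only [hgb, hgb2]
    rw [pvCountEq s t M hs, ← hcdef]
    rw [show ((c : Int) + 1) = ((c + 1 : Nat) : Int) by push_cast; ring]
    rw [PySem.List.pyRange_zero_natCast, List.map_map]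
    apply List.map_congr_left
    intro k _
    simp only [Function.comp_apply]
    rw [show ((s : Int) + k) = ((s + k : Nat) : Int) by push_cast; ring]
    rw [PySem.Int.mod_natCast, pvBintograyB, if_neg (by omega), Int.toNat_natCast]
  rw [hA, hB]

-- ===== VERDICT (by name: the statement is the Claim_ definition above) =====
theorem index_interval_spec : Claim_equal_index_interval := by
  intro lb ub nbits graycode hdom hpre
  unfold Spec_index_interval
  rcases graycode with _ | _
  · -- non-gray: lb ≤ ub
    have hle : lb ≤ ub := by simpa [Pre_index_interval] using hpre
    simp only [index_interval, index_interval_alt, Bool.false_eq_true, if_false, if_pos hle]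
    rw [pvLoopA_lin nbits (ub - lb).toNat ((ub - lb).toNat) le_rfl lb ub (by omega) []]
    simp
  · -- gray
    rcases nbits with _ | n
    · exact absurd hpre (by simp [Pre_index_interval])
    · have hpre' : 0 ≤ n ∧ 0 ≤ lb ∧ 0 ≤ ub ∧
          (32 ≤ n ∨ (lb < ((2 ^ n.toNat : Nat) : Int) ∧ ub < ((2 ^ n.toNat : Nat) : Int))) := by
        simpa [Pre_index_interval] using hpre
      obtain ⟨hn, hlb, hub, hbnd⟩ := hpre'
      have hdom' : lb ≤ 2147483648 ∧ ub ≤ 2147483648 := by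
        simp only [Dom_index_interval, pvDomInt, Bool.and_eq_true, decide_eq_true_eq] at hdom
        exact ⟨hdom.1.1.2, hdom.1.2.2⟩
      have hbig : 32 ≤ n → ((2147483649 : Int) ≤ ((2 ^ n.toNat : Nat) : Int)) := by
        intro h32
        calc (2147483649 : Int) ≤ ((2 ^ 32 : Nat) : Int) := by norm_num
          _ ≤ ((2 ^ n.toNat : Nat) : Int) := by
              exact_mod_cast Nat.pow_le_pow_right (by omega) (by omega)
      have hlb2 : lb < ((2 ^ n.toNat : Nat) : Int) := by
        rcases hbnd with h32 | hb
        · have := hbig h32; omega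
        · exact hb.1
      have hub2 : ub < ((2 ^ n.toNat : Nat) : Int) := by
        rcases hbnd with h32 | hb
        · have := hbig h32; omega
        · exact hb.2
      exact index_interval_gray lb ub n hn hlb hub hlb2 hub2
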